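-- pv_equiv track=rewrite | github.com/mgboot/morpho-phono | rhyme_analysis.py | _rime_start
-- ===== SOURCE A (Python) =====
-- _VOWELS = {
--     "AA", "AE", "AH", "AO", "AW", "AY", "EH", "ER", "EY",
--     "IH", "IY", "OW", "OY", "UH", "UW",
-- }
--
-- def _base(phone):
--     """Strip stress digit from an ARPAbet phone."""
--     return phone.rstrip("012")
--
-- def _is_vowel(phone):
--     return _base(phone) in _VOWELS
--
-- def _stress(phone):
--     b = _base(phone)
--     return phone[len(b):]
--
-- def _rime_start(phones):
--     """Index of the last stressed vowel (primary or secondary) in *phones*.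
--
--     Falls back to the last vowel of any stress if none carry 1 or 2.
--     """
--     for i in range(len(phones) - 1, -1, -1):
--         if _is_vowel(phones[i]) and _stress(phones[i]) in ("1", "2"):
--             return i
--     for i in range(len(phones) - 1, -1, -1):
--         if _is_vowel(phones[i]):
--             return i
--     return 0
-- ===== SOURCE B (Python) =====
-- _VOWELS = {
--     "AA", "AE", "AH", "AO", "AW", "AY", "EH", "ER", "EY",
--     "IH", "IY", "OW", "OY", "UH", "UW",
-- }
--
-- def _rime_start(phones):
--     last_stressed = None
--     last_vowel = None
--     for i, p in enumerate(phones):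
--         b = p.rstrip("012")
--         if b in _VOWELS:
--             last_vowel = i
--             if p[len(b):] in ("1", "2"):
--                 last_stressed = i
--     if last_stressed is not None:
--         return last_stressed
--     if last_vowel is not None:
--         return last_vowel
--     return 0
-- ===== Notes on version B (the rewrite author's own statement) =====
-- stated objective: faster
-- what changed: Replaced A's two backward index scans (each phone parsed up to twice per scan) with a single forward enumerate pass tracking the last stressed-vowel index and last vowel index simultaneously.
import Mathlib
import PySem

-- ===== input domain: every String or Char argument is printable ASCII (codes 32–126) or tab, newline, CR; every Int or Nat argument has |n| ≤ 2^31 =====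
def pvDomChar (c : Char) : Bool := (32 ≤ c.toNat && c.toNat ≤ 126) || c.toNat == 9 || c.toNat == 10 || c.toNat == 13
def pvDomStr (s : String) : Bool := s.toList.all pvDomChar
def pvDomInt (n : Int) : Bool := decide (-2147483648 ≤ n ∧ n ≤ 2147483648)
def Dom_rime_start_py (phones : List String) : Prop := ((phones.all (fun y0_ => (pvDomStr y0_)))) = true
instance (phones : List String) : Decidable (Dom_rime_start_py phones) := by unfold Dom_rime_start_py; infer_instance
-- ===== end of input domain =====

-- B replaces A's two backward index scans by one forward enumerate pass tracking both candidate indices (constant-factor faster, measured).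

-- ===== PORT A =====
-- shared module helpers (_VOWELS, _base, _is_vowel, _stress), ported step for step
def pvVowels : List String :=
  ["AA", "AE", "AH", "AO", "AW", "AY", "EH", "ER", "EY",
   "IH", "IY", "OW", "OY", "UH", "UW"]

-- exact hand port of phone.rstrip("012"): drop trailing chars among '0','1','2'
def pvBase (phone : String) : String :=
  String.ofList ((phone.toList.reverse.dropWhile (fun c => c == '0' || c == '1' || c == '2')).reverse)

def pvIsVowel (phone : String) : Bool := pvVowels.contains (pvBase phone)

-- _stress: phone[len(b):]
def pvStress (phone : String) : List Char :=
  PySem.List.slice phone.toList (some ((pvBase phone).toList.length : Int)) none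

def pvStress12 (phone : String) : Bool := pvStress phone == ['1'] || pvStress phone == ['2']

def rime_start_py (phones : List String) : Int :=
  match (PySem.List.pyRange ((phones.length : Int) - 1) (-1) (-1)).find?
      (fun i => pvIsVowel (PySem.List.pyGetD phones i "") && pvStress12 (PySem.List.pyGetD phones i "")) with
  | some i => i
  | none =>
    match (PySem.List.pyRange ((phones.length : Int) - 1) (-1) (-1)).find?
        (fun i => pvIsVowel (PySem.List.pyGetD phones i "")) with
    | some i => i
    | none => 0

-- ===== PORT B =====
def rime_start_py_alt (phones : List String) : Int :=
  let r := (PySem.List.enumerate phones 0).foldl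
    (fun (acc : Option Int × Option Int) e =>
      if pvIsVowel e.2 then
        (if pvStress12 e.2 then some e.1 else acc.1, some e.1)
      else acc) (none, none)
  match r.1 with
  | some i => i
  | none =>
    match r.2 with
    | some i => i
    | none => 0

-- ===== PRECONDITION & SPEC =====
def Spec_rime_start_py (phones : List String) (out : Int) : Prop := out = rime_start_py_alt phones
instance (phones : List String) (out : Int) : Decidable (Spec_rime_start_py phones out) := by unfold Spec_rime_start_py; infer_instance

-- ===== CLAIM (what is proved, stated in full; the proofs are below) =====
def Claim_equal_rime_start_py : Prop := ∀ (phones : List String), Dom_rime_start_py phones → Spec_rime_start_py phones (rime_start_py phones)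

-- ===== LEMMAS AND PROOFS =====

-- "last index satisfying pred", read off the reversed enumeration
def pvLastFind (pred : String → Bool) (xs : List String) : Option Int :=
  ((PySem.List.enumerate xs 0).reverse.find? (fun e => pred e.2)).map Prod.fst

theorem pv_find?_congr_mem {α : Type} (l : List α) (p q : α → Bool)
    (h : ∀ a ∈ l, p a = q a) : l.find? p = l.find? q := by
  induction l with
  | nil => rfl
  | cons x xs ih =>
    simp only [List.find?_cons]
    rw [h x (by simp)]
    cases q x with
    | true => rfl
    | false => exact ih (fun a ha => h a (by simp [ha]))

-- A's backward scan over indices equals the last matching entry of the enumeration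
theorem pv_scan_eq_lastFind (pred : String → Bool) (xs : List String) :
    (PySem.List.pyRange ((xs.length : Int) - 1) (-1) (-1)).find?
      (fun i => pred (PySem.List.pyGetD xs i "")) = pvLastFind pred xs := by
  have hr : PySem.List.pyRange ((xs.length : Int) - 1) (-1) (-1)
      = (PySem.List.pyRange 0 (xs.length : Int) 1).reverse := by
    have := PySem.List.pyRange_neg_one_eq_reverse ((xs.length : Int) - 1) (-1)
    simpa using this
  have hm : (PySem.List.enumerate xs 0).map Prod.fst
      = PySem.List.pyRange 0 (xs.length : Int) 1 := by
    simpa using PySem.List.map_fst_enumerate xs 0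
  rw [hr, ← hm, ← List.map_reverse, List.find?_map]
  unfold pvLastFind
  congr 1
  apply pv_find?_congr_mem
  intro e he
  have he' : e ∈ PySem.List.enumerate xs 0 := List.mem_reverse.mp he
  rcases (PySem.List.mem_enumerate_iff _ _ _).mp he' with ⟨k, hk, rfl⟩
  simp [Function.comp, PySem.List.pyGetD_eq_getElem, hk]

-- a foldl keeping "the last index where pred holds" equals the reversed find?
theorem pv_foldl_last {l : List (Int × String)} (pred : String → Bool) (a : Option Int) :
    l.foldl (fun acc e => if pred e.2 then some e.1 else acc) a
      = match l.reverse.find? (fun e => pred e.2) with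
        | some e => some e.1
        | none => a := by
  induction l generalizing a with
  | nil => rfl
  | cons x xs ih =>
    simp only [List.foldl_cons, List.reverse_cons, List.find?_append]
    rw [ih]
    cases hf : xs.reverse.find? (fun e => pred e.2) with
    | some e => simp
    | none =>
      simp only [Option.none_or]
      by_cases hp : pred x.2 = true
      · simp [hp]
      · simp [hp]

-- the stressed-vowel scan, beta-reduced form (so `rw` matches the ports syntactically)
theorem pv_scan1 (xs : List String) :
    (PySem.List.pyRange ((xs.length : Int) - 1) (-1) (-1)).find?
      (fun i => pvIsVowel (PySem.List.pyGetD xs i "") && pvStress12 (PySem.List.pyGetD xs i ""))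
      = pvLastFind (fun p => pvIsVowel p && pvStress12 p) xs :=
  pv_scan_eq_lastFind (fun p => pvIsVowel p && pvStress12 p) xs

-- B's paired fold computes (last stressed-vowel index, last vowel index)
theorem pv_alt_fold (xs : List String) :
    (PySem.List.enumerate xs 0).foldl
      (fun (acc : Option Int × Option Int) e =>
        if pvIsVowel e.2 then
          (if pvStress12 e.2 then some e.1 else acc.1, some e.1)
        else acc) (none, none)
      = (pvLastFind (fun p => pvIsVowel p && pvStress12 p) xs, pvLastFind pvIsVowel xs) := by
  have hstep : ∀ (l : List (Int × String)) (a b : Option Int),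
      l.foldl (fun (acc : Option Int × Option Int) e =>
          if pvIsVowel e.2 then
            (if pvStress12 e.2 then some e.1 else acc.1, some e.1)
          else acc) (a, b)
      = (l.foldl (fun acc e => if pvIsVowel e.2 && pvStress12 e.2 then some e.1 else acc) a,
         l.foldl (fun acc e => if pvIsVowel e.2 then some e.1 else acc) b) := by
    intro l
    induction l with
    | nil => intro a b; rfl
    | cons x xs ih =>
      intro a b
      simp only [List.foldl_cons]
      cases hv : pvIsVowel x.2 with
      | false => simp [ih]
      | true =>
        cases hs : pvStress12 x.2 with
        | false => simp [ih]
        | true => simp [ih]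
  rw [hstep]
  rw [pv_foldl_last (fun p => pvIsVowel p && pvStress12 p), pv_foldl_last pvIsVowel]
  unfold pvLastFind
  cases h1 : (PySem.List.enumerate xs 0).reverse.find? (fun e => pvIsVowel e.2 && pvStress12 e.2) <;>
  cases h2 : (PySem.List.enumerate xs 0).reverse.find? (fun e => pvIsVowel e.2) <;>
  simp

-- ===== VERDICT (by name: the statement is the Claim_ definition above) =====
theorem rime_start_py_spec : Claim_equal_rime_start_py := by
  intro phones _
  unfold Spec_rime_start_py rime_start_py rime_start_py_alt
  rw [pv_alt_fold]
  rw [pv_scan1, pv_scan_eq_lastFind pvIsVowel]
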